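-- pv_equiv track=rewrite | github.com/bozbulanik/Schelling-s-Model-of-Segregation-with-Python | main.py | n_check
-- ===== SOURCE A (Python) =====
-- def n_check(x_check, y_check, boardToCheck, group):
--     sumOfN = 0
--     for i, j in (
--             (x_check - 1, y_check), (x_check + 1, y_check), (x_check, y_check - 1),
--             (x_check, y_check + 1), (x_check - 1, y_check - 1), (x_check - 1, y_check + 1),
--             (x_check + 1, y_check - 1), (x_check + 1, y_check + 1)):
--         if not (0 <= i < len(boardToCheck) and 0 <= j < len(boardToCheck[i])):
--             continue
--         if boardToCheck[i][j]==group: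
--             sumOfN+=1
--     return sumOfN
-- ===== SOURCE B (Python) =====
-- def n_check(x_check, y_check, boardToCheck, group):
--     # Three clamped row-slice counts instead of eight point lookups,
--     # then subtract the center cell if it is in bounds and matches.
--     total = 0
--     for r in (x_check - 1, x_check, x_check + 1):
--         if 0 <= r < len(boardToCheck):
--             total += boardToCheck[r][max(0, y_check - 1):max(0, y_check + 2)].count(group)
--     if (0 <= x_check < len(boardToCheck)
--             and 0 <= y_check < len(boardToCheck[x_check])
--             and boardToCheck[x_check][y_check] == group):
--         total -= 1
--     return total
-- ===== Notes on version B (the rewrite author's own statement) =====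
-- stated objective: alternative
-- what changed: Replaces A's loop over eight explicit neighbor coordinates with per-row clamped slice counts (board[r][max(0,y-1):max(0,y+2)].count(group) for the three candidate rows) followed by subtracting the in-bounds matching center cell.
import Mathlib
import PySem

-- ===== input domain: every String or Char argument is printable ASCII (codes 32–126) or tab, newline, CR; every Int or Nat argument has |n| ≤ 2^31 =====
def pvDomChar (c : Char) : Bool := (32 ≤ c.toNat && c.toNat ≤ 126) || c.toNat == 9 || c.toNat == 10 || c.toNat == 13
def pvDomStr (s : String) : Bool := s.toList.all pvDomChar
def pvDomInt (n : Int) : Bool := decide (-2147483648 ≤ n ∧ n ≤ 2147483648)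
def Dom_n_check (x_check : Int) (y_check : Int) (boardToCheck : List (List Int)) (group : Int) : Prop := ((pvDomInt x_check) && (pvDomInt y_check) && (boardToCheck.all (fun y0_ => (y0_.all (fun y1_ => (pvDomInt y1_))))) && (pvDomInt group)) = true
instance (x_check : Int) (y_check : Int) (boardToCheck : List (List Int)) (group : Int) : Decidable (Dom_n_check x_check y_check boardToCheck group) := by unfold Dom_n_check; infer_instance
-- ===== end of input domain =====

-- B replaces A's eight individual neighbor lookups by three clamped row-slice
-- counts plus a center-cell correction (objective: alternative decomposition).


-- ===== PORT A =====
-- Literal port of A: fold over the tuple of 8 neighbor coordinates; skip when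
-- out of bounds (the row length is only read after the row index is checked,
-- like Python's short-circuit `and`), else count a match.
def n_check (x_check : Int) (y_check : Int) (boardToCheck : List (List Int)) (group : Int) : Int :=
  [(x_check - 1, y_check), (x_check + 1, y_check), (x_check, y_check - 1),
   (x_check, y_check + 1), (x_check - 1, y_check - 1), (x_check - 1, y_check + 1),
   (x_check + 1, y_check - 1), (x_check + 1, y_check + 1)].foldl
    (fun sumOfN p =>
      if ¬ (0 ≤ p.1 ∧ p.1 < (boardToCheck.length : Int) ∧ 0 ≤ p.2 ∧
            p.2 < ((boardToCheck.getD p.1.toNat []).length : Int)) then sumOfN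
      else if (boardToCheck.getD p.1.toNat []).getD p.2.toNat 0 == group then sumOfN + 1
      else sumOfN) 0

-- ===== PORT B =====
-- Literal port of Source B: three row-slice counts, then the center correction.
def n_check_alt (x_check : Int) (y_check : Int) (boardToCheck : List (List Int)) (group : Int) : Int :=
  let total := [x_check - 1, x_check, x_check + 1].foldl
    (fun total r =>
      if 0 ≤ r ∧ r < (boardToCheck.length : Int) then
        total + (PySem.List.count
          (PySem.List.slice (boardToCheck.getD r.toNat [])
            (some (max 0 (y_check - 1))) (some (max 0 (y_check + 2)))) group : Int)
      else total) 0
  if 0 ≤ x_check ∧ x_check < (boardToCheck.length : Int) ∧ 0 ≤ y_check ∧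
     y_check < ((boardToCheck.getD x_check.toNat []).length : Int) ∧
     (boardToCheck.getD x_check.toNat []).getD y_check.toNat 0 == group
  then total - 1 else total

-- ===== PRECONDITION & SPEC =====
def Spec_n_check (x_check : Int) (y_check : Int) (boardToCheck : List (List Int)) (group : Int) (out : Int) : Prop := out = n_check_alt x_check y_check boardToCheck group
instance (x_check : Int) (y_check : Int) (boardToCheck : List (List Int)) (group : Int) (out : Int) : Decidable (Spec_n_check x_check y_check boardToCheck group out) := by unfold Spec_n_check; infer_instance

-- ===== CLAIM (what is proved, stated in full; the proofs are below) =====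
def Claim_equal_n_check : Prop := ∀ (x_check : Int) (y_check : Int) (boardToCheck : List (List Int)) (group : Int), Dom_n_check x_check y_check boardToCheck group → Spec_n_check x_check y_check boardToCheck group (n_check x_check y_check boardToCheck group)

-- ===== LEMMAS AND PROOFS =====

-- indicator: cell at Nat index m of a row matches group
def cntN (ys : List Int) (m : Nat) (g : Int) : Int :=
  if h : m < ys.length then (if ys[m] = g then 1 else 0) else 0

-- indicator: cell at Int index j of a row matches group
def cnt (ys : List Int) (j : Int) (g : Int) : Int :=
  if 0 ≤ j ∧ j < (ys.length : Int) ∧ ys.getD j.toNat 0 = g then 1 else 0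

-- indicator: cell (i, j) of the board matches group
def rc (b : List (List Int)) (i j g : Int) : Int :=
  if 0 ≤ i ∧ i < (b.length : Int) then cnt (b.getD i.toNat []) j g else 0

lemma cnt_of_nonneg (ys : List Int) (j g : Int) (hj : 0 ≤ j) :
    cnt ys j g = cntN ys j.toNat g := by
  unfold cnt cntN
  by_cases hlt : j.toNat < ys.length
  · rw [dif_pos hlt, List.getD_eq_getElem ys 0 hlt]
    split_ifs <;> omega
  · rw [dif_neg hlt]
    split_ifs with h
    · omega
    · rfl

lemma cnt_of_neg (ys : List Int) (j g : Int) (hj : j < 0) : cnt ys j g = 0 := by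
  unfold cnt; split_ifs with h1; · omega
  · rfl

-- one step of counting a window: peel the first index off the slice
lemma count_window_step (ys : List Int) (g : Int) (m k : Nat) :
    (((ys.drop m).take (k + 1)).count g : Int)
      = cntN ys m g + (((ys.drop (m + 1)).take k).count g : Int) := by
  by_cases h : m < ys.length
  · rw [List.drop_eq_getElem_cons h, List.take_succ_cons, List.count_cons]
    unfold cntN
    rw [dif_pos h]
    by_cases he : ys[m] = g
    · simp [he]
      ring
    · simp [he]
  · have h1 : ys.drop m = [] := List.drop_eq_nil_of_le (by omega)
    have h2 : ys.drop (m + 1) = [] := List.drop_eq_nil_of_le (by omega)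
    unfold cntN
    rw [dif_neg h]
    simp [h1, h2]

-- a clamped 3-window slice count is the sum of the three cell indicators
lemma win (ys : List Int) (y g : Int) :
    (PySem.List.count
      (PySem.List.slice ys (some (max 0 (y - 1))) (some (max 0 (y + 2)))) g : Int)
      = cnt ys (y - 1) g + cnt ys y g + cnt ys (y + 1) g := by
  rw [PySem.List.count_eq, PySem.List.slice_toNat ys (le_max_left _ _) (le_max_left _ _)]
  rcases (by omega : y ≤ -2 ∨ -2 < y) with hy | hy
  · have ha : (max 0 (y - 1)).toNat = 0 := by omega
    have hb : (max 0 (y + 2)).toNat = 0 := by omega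
    rw [ha, hb]
    simp [cnt_of_neg ys (y - 1) g (by omega), cnt_of_neg ys y g (by omega),
      cnt_of_neg ys (y + 1) g (by omega)]
  rcases lt_trichotomy y 0 with hy0 | hy0 | hy0
  · -- y = -1 : window [0,1)
    have hym : y = -1 := by omega
    subst hym
    have ha : (max 0 (-1 - 1 : Int)).toNat = 0 := by decide
    have hb : (max 0 (-1 + 2 : Int)).toNat = 1 := by decide
    rw [ha, hb]
    have := count_window_step ys g 0 0
    simp only [Nat.zero_add] at this
    rw [show (1 : Nat) - 0 = 0 + 1 by rfl, this]
    simp [cnt_of_neg ys (-2) g (by omega), cnt_of_neg ys (-1) g (by omega),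
      cnt_of_nonneg ys 0 g le_rfl]
  · -- y = 0 : window [0,2)
    subst hy0
    have ha : (max 0 (0 - 1 : Int)).toNat = 0 := by decide
    have hb : (max 0 (0 + 2 : Int)).toNat = 2 := by decide
    rw [ha, hb]
    rw [show (2 : Nat) - 0 = 1 + 1 by rfl, count_window_step ys g 0 1,
      show (1 : Nat) = 0 + 1 by rfl, count_window_step ys g 1 0]
    simp [cnt_of_neg ys (-1) g (by omega),
      cnt_of_nonneg ys 0 g le_rfl, cnt_of_nonneg ys 1 g (by omega)]
  · -- y ≥ 1 : window [y-1, y+2)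
    have ha : (max 0 (y - 1)).toNat = (y - 1).toNat := by omega
    have hb : (max 0 (y + 2)).toNat - (max 0 (y - 1)).toNat = 2 + 1 := by omega
    rw [hb, ha, count_window_step ys g (y - 1).toNat 2,
      show (2 : Nat) = 1 + 1 by rfl, count_window_step ys g ((y - 1).toNat + 1) 1,
      show (1 : Nat) = 0 + 1 by rfl, count_window_step ys g ((y - 1).toNat + 2) 0]
    rw [cnt_of_nonneg ys (y - 1) g (by omega), cnt_of_nonneg ys y g (by omega),
      cnt_of_nonneg ys (y + 1) g (by omega)]
    have h1 : y.toNat = (y - 1).toNat + 1 := by omega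
    have h2 : (y + 1).toNat = (y - 1).toNat + 2 := by omega
    rw [h1, h2]
    simp
    ring

-- A's loop body contributes exactly the board-cell indicator rc
lemma a_term (b : List (List Int)) (i j g s : Int) :
    (if ¬ (0 ≤ i ∧ i < (b.length : Int) ∧ 0 ≤ j ∧
           j < ((b.getD i.toNat []).length : Int)) then s
     else if (b.getD i.toNat []).getD j.toNat 0 == g then s + 1 else s)
      = s + rc b i j g := by
  unfold rc cnt
  simp only [beq_iff_eq]
  split_ifs <;> omega

-- the center correction of B is exactly rc at the center
lemma center_term (b : List (List Int)) (x y g t : Int) :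
    (if 0 ≤ x ∧ x < (b.length : Int) ∧ 0 ≤ y ∧
        y < ((b.getD x.toNat []).length : Int) ∧
        (b.getD x.toNat []).getD y.toNat 0 == g
     then t - 1 else t) = t - rc b x y g := by
  unfold rc cnt
  simp only [beq_iff_eq]
  split_ifs <;> omega

-- ===== VERDICT (by name: the statement is the Claim_ definition above) =====
theorem n_check_spec : Claim_equal_n_check := by
  intro x y b g _
  unfold Spec_n_check n_check n_check_alt
  simp only [List.foldl_cons, List.foldl_nil, a_term, win]
  rw [center_term]
  have hrow : ∀ r : Int,
      (if 0 ≤ r ∧ r < (b.length : Int) then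
        cnt (b.getD r.toNat []) (y - 1) g + cnt (b.getD r.toNat []) y g +
          cnt (b.getD r.toNat []) (y + 1) g else 0)
        = rc b r (y - 1) g + rc b r y g + rc b r (y + 1) g := by
    intro r; unfold rc; split_ifs <;> ring
  have key : ∀ s r : Int,
      (if 0 ≤ r ∧ r < (b.length : Int) then
        s + (cnt (b.getD r.toNat []) (y - 1) g + cnt (b.getD r.toNat []) y g +
          cnt (b.getD r.toNat []) (y + 1) g) else s)
        = s + (rc b r (y - 1) g + rc b r y g + rc b r (y + 1) g) := by
    intro s r
    rw [← hrow r]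
    split_ifs <;> ring
  rw [key, key, key]
  ring
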